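-- pv_equiv track=rewrite | github.com/hush1a/CTF-archive | NETCOMP-3.0/Cryptography-i swear this is not a web or reverse/solve.py | reverse_hash
-- ===== SOURCE A (Python) =====
-- import string
--
-- magic = [
--     0x1fa9787f52d6819dac3e51c96c9850ac9a68a000,
--     0x551e7b2ade66a9cd21538d24f8232eb9e3c6a00,
--     0x685130edf575c5fd89b4ea52d8ce440fb75d40,
--     0x4d2b06845e7f210fd15f3697fe234c69919a0,
--     0x267227d769f1422427c2f550f7852c59bfec,
--     0xd9fd323c23dd5a26579cb53a8a42996b38,
--     0x388a9fbf545b3b1a5e4b80376e94de767,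
--     0xadef7b085371d7244d43d0011e7c6d5,
--     0x18cbc26aefc3b3b1ef4588ce4acc6b,
--     0x296e5ed6f99d55e5efb08eb856e9,
--     0x314ef6584d10a8c5226f105685,
--     0x2798a7a450463592994fc72f,
--     0x133caaa3da819c1ca0087d,
--     0x445974d799d8bcf9c3b,
-- ]
--
-- magic2 = 0x2971713e56d0006e6a0b48126ca34000
--
-- def reverse_hash(expected_char):
--     for c in string.printable:
--         result = 0
--         oneChar = -ord(c)
--         for j in range(len(magic)):
--             result *= oneChar
--             result += magic[len(magic) - 1 - j]
--         nresult = result % magic2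
--         result = -result // magic2
--         result += (888 - result) * (result > 127)
--         result += (888 - result) * (not (nresult == 0))
--         result += (888 - result) * (result < 33)
--         calculated_char = chr(result)
--         if calculated_char == expected_char:
--             return c
--     return None
-- ===== SOURCE B (Python) =====
-- import string
--
-- magic = [
--     0x1fa9787f52d6819dac3e51c96c9850ac9a68a000,
--     0x551e7b2ade66a9cd21538d24f8232eb9e3c6a00,
--     0x685130edf575c5fd89b4ea52d8ce440fb75d40,
--     0x4d2b06845e7f210fd15f3697fe234c69919a0,
--     0x267227d769f1422427c2f550f7852c59bfec,
--     0xd9fd323c23dd5a26579cb53a8a42996b38,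
--     0x388a9fbf545b3b1a5e4b80376e94de767,
--     0xadef7b085371d7244d43d0011e7c6d5,
--     0x18cbc26aefc3b3b1ef4588ce4acc6b,
--     0x296e5ed6f99d55e5efb08eb856e9,
--     0x314ef6584d10a8c5226f105685,
--     0x2798a7a450463592994fc72f,
--     0x133caaa3da819c1ca0087d,
--     0x445974d799d8bcf9c3b,
-- ]
--
-- magic2 = 0x2971713e56d0006e6a0b48126ca34000
--
--
-- def _hash_char(c):
--     """The forward hash: evaluate the magic polynomial at -ord(c),
--     reduce by magic2 and clamp outside [33, 127] (or any remainder) to 888."""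
--     x = -ord(c)
--     value = sum(coeff * x ** i for i, coeff in enumerate(magic))
--     q, rem = divmod(value, magic2)
--     r = -q
--     if rem != 0 or r > 127 or r < 33:
--         return chr(888)
--     return chr(r)
--
--
-- def reverse_hash(expected_char):
--     table = {}
--     for c in string.printable:
--         table.setdefault(_hash_char(c), c)
--     return table.get(expected_char)
-- ===== Notes on version B (the rewrite author's own statement) =====
-- stated objective: idiomatic
-- what changed: Replaces A's short-circuiting brute-force scan with an inverse lookup table built once over string.printable (setdefault keeps the first preimage) followed by a single dict .get, and evaluates the magic polynomial as an enumerated power sum instead of A's index-reversed Horner loop with boolean-arithmetic clamping.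
import Mathlib
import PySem

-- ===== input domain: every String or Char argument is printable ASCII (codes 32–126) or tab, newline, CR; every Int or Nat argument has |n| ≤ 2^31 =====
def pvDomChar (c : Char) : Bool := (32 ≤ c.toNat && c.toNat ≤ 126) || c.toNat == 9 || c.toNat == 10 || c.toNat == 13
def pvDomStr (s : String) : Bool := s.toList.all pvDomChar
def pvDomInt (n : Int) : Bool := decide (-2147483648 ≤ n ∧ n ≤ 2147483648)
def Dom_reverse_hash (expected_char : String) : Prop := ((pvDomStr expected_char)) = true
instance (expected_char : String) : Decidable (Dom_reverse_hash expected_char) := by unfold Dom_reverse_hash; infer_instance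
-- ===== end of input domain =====

-- B replaces A's short-circuiting brute-force scan by a precomputed inverse table
-- (hash -> first preimage, via setdefault) plus one lookup, and evaluates the magic
-- polynomial as an enumerated power sum instead of A's Horner loop (objective: idiomatic).

def pyMagic : List Int := [
  0x1fa9787f52d6819dac3e51c96c9850ac9a68a000,
  0x551e7b2ade66a9cd21538d24f8232eb9e3c6a00,
  0x685130edf575c5fd89b4ea52d8ce440fb75d40,
  0x4d2b06845e7f210fd15f3697fe234c69919a0,
  0x267227d769f1422427c2f550f7852c59bfec,
  0xd9fd323c23dd5a26579cb53a8a42996b38,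
  0x388a9fbf545b3b1a5e4b80376e94de767,
  0xadef7b085371d7244d43d0011e7c6d5,
  0x18cbc26aefc3b3b1ef4588ce4acc6b,
  0x296e5ed6f99d55e5efb08eb856e9,
  0x314ef6584d10a8c5226f105685,
  0x2798a7a450463592994fc72f,
  0x133caaa3da819c1ca0087d,
  0x445974d799d8bcf9c3b]

def pyMagic2 : Int := 0x2971713e56d0006e6a0b48126ca34000

-- string.printable, in Python's exact order
def pyPrintable : List Char :=
  "0123456789abcdefghijklmnopqrstuvwxyzABCDEFGHIJKLMNOPQRSTUVWXYZ!\"#$%&'()*+,-./:;<=>?@[\\]^_`{|}~ \t\n\r\x0b\x0c".toList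

-- ===== PORT A =====
-- body of A's outer loop: computes calculated_char for c, step for step
-- (all indices magic[len-1-j] are in range, so getD's default is never used;
--  result is always in 33..127 or 888, so chr = Char.ofNat ∘ toNat is exact)
def calcA (c : Char) : String :=
  let oneChar : Int := -(c.toNat : Int)
  let result : Int := (List.range pyMagic.length).foldl
      (fun result j => result * oneChar + pyMagic.getD (pyMagic.length - 1 - j) 0) 0
  let nresult : Int := PySem.Int.mod result pyMagic2
  let result : Int := PySem.Int.floordiv (-result) pyMagic2
  let result : Int := result + (888 - result) * (if result > 127 then (1:Int) else 0)
  let result : Int := result + (888 - result) * (if ¬ (nresult = 0) then (1:Int) else 0)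
  let result : Int := result + (888 - result) * (if result < 33 then (1:Int) else 0)
  String.singleton (Char.ofNat result.toNat)

-- A's 'for c in string.printable: … return c' loop with its early return
def reverseHashGo (expected_char : String) : List Char → Option String
  | [] => none
  | c :: rest =>
      if calcA c = expected_char then some (String.singleton c)
      else reverseHashGo expected_char rest

def reverse_hash (expected_char : String) : Option String :=
  reverseHashGo expected_char pyPrintable

-- ===== PORT B =====
-- Source B's _hash_char: sum(coeff * x**i for i, coeff in enumerate(magic)), divmod, clamp.
-- (enumerate indices i are ≥ 0, so x ** i = x ^ i.toNat exactly; pyMagic2 ≠ 0, so the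
--  divmod? none branch is unreachable — it only makes the definition total)
def hashChar (c : Char) : String :=
  let x : Int := -(c.toNat : Int)
  let value : Int := (PySem.List.enumerate pyMagic).foldl (fun acc p => acc + p.2 * x ^ p.1.toNat) 0
  match PySem.Int.divmod? value pyMagic2 with
  | none => ""
  | some (q, rem) =>
    let r : Int := -q
    if rem ≠ 0 ∨ r > 127 ∨ r < 33 then String.singleton (Char.ofNat 888)
    else String.singleton (Char.ofNat r.toNat)

-- table = {}; for c in printable: table.setdefault(_hash_char(c), c); return table.get(expected_char)
def reverse_hash_alt (expected_char : String) : Option String :=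
  let table : PySem.Dict String String :=
    pyPrintable.foldl (fun d c => d.setdefault (hashChar c) (String.singleton c)) PySem.Dict.empty
  table.get? expected_char

-- ===== PRECONDITION & SPEC =====
def Spec_reverse_hash (expected_char : String) (out : Option String) : Prop := out = reverse_hash_alt expected_char
instance (expected_char : String) (out : Option String) : Decidable (Spec_reverse_hash expected_char out) := by unfold Spec_reverse_hash; infer_instance

-- ===== CLAIM (what is proved, stated in full; the proofs are below) =====
def Claim_equal_reverse_hash : Prop := ∀ (expected_char : String), Dom_reverse_hash expected_char → Spec_reverse_hash expected_char (reverse_hash expected_char)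

-- ===== LEMMAS AND PROOFS =====

-- the two per-character computations agree on every char of string.printable
theorem calc_agree : pyPrintable.all (fun c => calcA c == hashChar c) = true := by decide

-- A's scan is first-match search over the printable list
theorem go_eq_find (s : String) (cs : List Char) :
    reverseHashGo s cs = (cs.find? (fun c => calcA c == s)).map String.singleton := by
  induction cs with
  | nil => rfl
  | cons c rest ih =>
      by_cases h : calcA c = s
      · have hb : (calcA c == s) = true := beq_iff_eq.mpr h
        simp [reverseHashGo, List.find?, h]
      · have hb : (calcA c == s) = false := beq_eq_false_iff_ne.mpr h
        simp [reverseHashGo, List.find?, h, hb, ih]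

-- find? only depends on the predicate's values on the list's members
theorem find?_congr_mem {α : Type} (p q : α → Bool) (cs : List α)
    (h : ∀ c ∈ cs, p c = q c) : cs.find? p = cs.find? q := by
  induction cs with
  | nil => rfl
  | cons c rest ih =>
      have hc := h c (List.mem_cons_self ..)
      simp only [List.find?, hc]
      cases q c with
      | true => rfl
      | false => exact ih (fun x hx => h x (List.mem_cons_of_mem _ hx))

theorem setdefault_eq {κ ν : Type} [BEq κ] [LawfulBEq κ] (d : PySem.Dict κ ν) (k : κ) (v : ν) :
    d.setdefault k v = if d.contains k then d else d.insert k v := by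
  by_cases h : d.contains k = true
  · simp [PySem.Dict.setdefault, h]
  · simp only [PySem.Dict.setdefault, h, if_false, Bool.false_eq_true]
    apply PySem.Dict.ext
    rw [PySem.Dict.items_insert_of_not_contains _ _ (by simpa using h)]

-- looking up a setdefault-built table = first-match search, modulo what d already holds
theorem get?_fold_setdefault (f g : Char → String) (s : String) (cs : List Char) :
    ∀ (d : PySem.Dict String String),
      (cs.foldl (fun d c => d.setdefault (f c) (g c)) d).get? s
        = (d.get? s).or ((cs.find? (fun c => f c == s)).map g) := by
  induction cs with
  | nil => intro d; simp
  | cons c rest ih =>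
      intro d
      rw [List.foldl_cons, ih, setdefault_eq]
      by_cases hc : d.contains (f c) = true
      · simp only [hc, if_true]
        by_cases hfc : f c = s
        · have : (d.get? s).isSome := by
            rw [← PySem.Dict.contains_eq_isSome_get?, ← hfc]; exact hc
          obtain ⟨v, hv⟩ := Option.isSome_iff_exists.mp this
          have hb : (f c == s) = true := beq_iff_eq.mpr hfc
          simp [List.find?, hb, hv]
        · have hb : (f c == s) = false := beq_eq_false_iff_ne.mpr hfc
          simp [List.find?, hb]
      · simp only [hc, if_false, Bool.false_eq_true]
        by_cases hfc : f c = s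
        · have hnone : d.get? s = none := by
            rw [PySem.Dict.get?_eq_none_iff_contains, ← hfc]
            simpa using hc
          have hb : (f c == s) = true := beq_iff_eq.mpr hfc
          rw [PySem.Dict.get?_insert]
          simp [List.find?, hfc, hnone]
        · have hb : (f c == s) = false := beq_eq_false_iff_ne.mpr hfc
          rw [PySem.Dict.get?_insert]
          simp [List.find?, hb, Ne.symm hfc]

-- ===== VERDICT (by name: the statement is the Claim_ definition above) =====
theorem reverse_hash_spec : Claim_equal_reverse_hash := by
  intro s _
  unfold Spec_reverse_hash reverse_hash reverse_hash_alt
  rw [go_eq_find, get?_fold_setdefault hashChar String.singleton s pyPrintable PySem.Dict.empty,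
      PySem.Dict.get?_empty, Option.none_or]
  refine congrArg (Option.map String.singleton) (find?_congr_mem _ _ _ ?_)
  intro c hc
  have h := List.all_eq_true.mp calc_agree c hc
  simp only [beq_iff_eq] at h
  rw [h]
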